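-- pv_equiv track=rewrite | github.com/MilaDog/Advent-Of-Code | src/2021/08/08.py | part1
-- ===== SOURCE A (Python) =====
-- def part1(data):
--     tlt = 0
--     for x, y in data:
--         for y in map(set, y.split()):
--             match len(y):
--                 case 2:
--                     tlt += 1
--                 case 3:
--                     tlt += 1
--                 case 4:
--                     tlt += 1
--                 case 7:
--                     tlt += 1
--                 case _:
--                     pass
--     return tlt
-- ===== SOURCE B (Python) =====
-- def part1(data):
--     easy = {2, 3, 4, 7}
--     total = 0
--     for _, y in data:
--         cur = set()
--         for ch in y:
--             if ch.isspace():
--                 if len(cur) in easy: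
--                     total += 1
--                 cur = set()
--             else:
--                 cur.add(ch)
--         if len(cur) in easy:
--             total += 1
--     return total
-- ===== Notes on version B (the rewrite author's own statement) =====
-- stated objective: alternative
-- what changed: Replaces split()-then-classify-each-word with a single character-level state machine that never materialises the word list: it scans each row once, growing the current word's distinct-character set and classifying it at each whitespace boundary and at end of row.
import Mathlib
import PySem

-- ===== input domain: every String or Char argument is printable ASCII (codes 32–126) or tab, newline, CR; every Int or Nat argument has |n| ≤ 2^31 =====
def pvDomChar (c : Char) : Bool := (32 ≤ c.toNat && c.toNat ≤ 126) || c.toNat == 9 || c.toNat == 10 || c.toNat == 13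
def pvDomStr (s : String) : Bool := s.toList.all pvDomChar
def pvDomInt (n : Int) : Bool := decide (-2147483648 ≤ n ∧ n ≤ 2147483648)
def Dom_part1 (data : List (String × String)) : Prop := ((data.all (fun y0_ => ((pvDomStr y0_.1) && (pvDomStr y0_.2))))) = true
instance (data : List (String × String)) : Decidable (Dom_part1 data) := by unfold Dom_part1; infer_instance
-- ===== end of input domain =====

-- B replaces split()-then-classify-each-word by a single character-level state machine that
-- never materialises the word list (alternative decomposition, same asymptotic cost).
-- ===== PORT A =====
def part1 (data : List (String × String)) : Int :=
  data.foldl (fun tlt p =>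
    ((PySem.Str.split₀ p.2).map (fun w => PySem.Set.ofList w.toList)).foldl
      (fun t y =>
        match PySem.Set.len y with
        | 2 => t + 1
        | 3 => t + 1
        | 4 => t + 1
        | 7 => t + 1
        | _ => t) tlt) 0

-- ===== PORT B =====
-- the 'easy' set literal {2, 3, 4, 7} of Source B
def part1AltEasy : PySem.Set Int := PySem.Set.ofList [(2 : Int), 3, 4, 7]

-- Source B's inner character loop over one row: state = current word's distinct-char set + running total
def part1AltGo (cs : List Char) (cur : PySem.Set Char) (total : Int) : Int :=
  match cs with
  | [] => if part1AltEasy.contains (PySem.Set.len cur) then total + 1 else total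
  | c :: rest =>
    if PySem.Chars.isspace c then
      part1AltGo rest PySem.Set.empty
        (if part1AltEasy.contains (PySem.Set.len cur) then total + 1 else total)
    else
      part1AltGo rest (PySem.Set.add cur c) total

def part1_alt (data : List (String × String)) : Int :=
  data.foldl (fun total p => part1AltGo p.2.toList PySem.Set.empty total) 0

-- ===== PRECONDITION & SPEC =====
def Spec_part1 (data : List (String × String)) (out : Int) : Prop := out = part1_alt data
instance (data : List (String × String)) (out : Int) : Decidable (Spec_part1 data out) := by unfold Spec_part1; infer_instance

-- ===== CLAIM (what is proved, stated in full; the proofs are below) =====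
def Claim_equal_part1 : Prop := ∀ (data : List (String × String)), Dom_part1 data → Spec_part1 data (part1 data)

-- ===== LEMMAS AND PROOFS =====

-- contribution (0 or 1) of one word of distinct-char count n
def easyCnt (n : Int) : Int :=
  if n = 2 ∨ n = 3 ∨ n = 4 ∨ n = 7 then 1 else 0

-- sum of contributions of a list of words (as char lists)
def easySum (ws : List (List Char)) : Int :=
  (ws.map (fun w => easyCnt (PySem.Set.len (PySem.Set.ofList w)))).sum

theorem easy_if_eq_cnt (n : Int) (t : Int) :
    (if part1AltEasy.contains n then t + 1 else t) = t + easyCnt n := by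
  have hc : part1AltEasy.contains n = decide (n = 2 ∨ n = 3 ∨ n = 4 ∨ n = 7) := by
    by_cases h2 : n = 2 <;> by_cases h3 : n = 3 <;> by_cases h4 : n = 4 <;>
      by_cases h7 : n = 7 <;>
      simp_all [part1AltEasy, PySem.Set.ofList, PySem.Set.add, PySem.Set.empty,
        PySem.Set.contains]
  rw [hc, easyCnt]
  by_cases h : n = 2 ∨ n = 3 ∨ n = 4 ∨ n = 7 <;> simp [h]

theorem match_eq_cnt (n : Int) (t : Int) :
    (match n with
     | 2 => t + 1 | 3 => t + 1 | 4 => t + 1 | 7 => t + 1 | _ => t) = t + easyCnt n := by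
  unfold easyCnt
  split <;> rename_i h <;> simp_all

-- A's inner fold over one row's words
theorem rowA_eq (ws : List (List Char)) (t : Int) :
    ((ws.map (fun w => PySem.Set.ofList w)).foldl
      (fun t y =>
        match PySem.Set.len y with
        | 2 => t + 1 | 3 => t + 1 | 4 => t + 1 | 7 => t + 1 | _ => t) t)
    = t + easySum ws := by
  induction ws generalizing t with
  | nil => simp [easySum]
  | cons w ws ih =>
    simp only [List.map_cons, List.foldl_cons, ih, easySum, List.map_cons, List.sum_cons]
    rw [match_eq_cnt]
    ring

-- split₀.go's accumulator is a reversed prefix of the output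
theorem split₀_go_acc (cs : List Char) (cur : List Char) (acc : List (List Char)) :
    PySem.Chars.split₀.go cs cur acc = acc.reverse ++ PySem.Chars.split₀.go cs cur [] := by
  induction cs generalizing cur acc with
  | nil =>
    simp only [PySem.Chars.split₀.go]
    by_cases h : cur.isEmpty <;> simp [h]
  | cons c rest ih =>
    simp only [PySem.Chars.split₀.go]
    by_cases hs : PySem.Chars.isspace c <;> simp only [hs, if_true, if_false, Bool.false_eq_true]
    · by_cases h : cur.isEmpty <;> simp only [h, if_true, if_false, Bool.false_eq_true]
      · exact ih [] acc
      · rw [ih [] (cur.reverse :: acc), ih [] [cur.reverse]]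
        simp
    · exact ih (c :: cur) acc

-- B's character state machine computes the same count as classifying split₀'s words
theorem goRow_eq (cs l : List Char) (t : Int) :
    part1AltGo cs (PySem.Set.ofList l) t
      = t + easySum (PySem.Chars.split₀.go cs l.reverse []) := by
  induction cs generalizing l t with
  | nil =>
    simp only [part1AltGo, PySem.Chars.split₀.go, easy_if_eq_cnt]
    by_cases h : l.reverse.isEmpty
    · have hl : l = [] := by simpa using h
      subst hl
      simp [easySum, easyCnt, PySem.Set.ofList, PySem.Set.len]
    · simp [h, easySum]
  | cons c rest ih =>
    simp only [part1AltGo, PySem.Chars.split₀.go]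
    by_cases hs : PySem.Chars.isspace c <;> simp only [hs, if_true, if_false, Bool.false_eq_true]
    · rw [easy_if_eq_cnt]
      have hB : part1AltGo rest PySem.Set.empty (t + easyCnt (PySem.Set.len (PySem.Set.ofList l)))
          = t + easyCnt (PySem.Set.len (PySem.Set.ofList l))
            + easySum (PySem.Chars.split₀.go rest [] []) := by
        have := ih [] (t + easyCnt (PySem.Set.len (PySem.Set.ofList l)))
        simpa [PySem.Set.ofList, PySem.Set.empty] using this
      rw [hB]
      by_cases h : l.reverse.isEmpty
      · have hl : l = [] := by simpa using h
        subst hl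
        simp [easySum, easyCnt, PySem.Set.ofList, PySem.Set.len]
      · rw [if_neg (by simp [h])]
        rw [split₀_go_acc rest [] [l.reverse.reverse]]
        simp [easySum]
        ring
    · have hadd : PySem.Set.add (PySem.Set.ofList l) c = PySem.Set.ofList (l ++ [c]) := by
        simp [PySem.Set.ofList_eq_foldl, List.foldl_append]
      rw [hadd, ih (l ++ [c]) t]
      simp

-- per-row equality of the two fold bodies
theorem row_eq (p : String × String) (t : Int) :
    ((PySem.Str.split₀ p.2).map (fun w => PySem.Set.ofList w.toList)).foldl
      (fun t y =>
        match PySem.Set.len y with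
        | 2 => t + 1 | 3 => t + 1 | 4 => t + 1 | 7 => t + 1 | _ => t) t
    = part1AltGo p.2.toList PySem.Set.empty t := by
  have hB : part1AltGo p.2.toList PySem.Set.empty t
      = t + easySum (PySem.Chars.split₀ p.2.toList) := by
    have := goRow_eq p.2.toList [] t
    simpa [PySem.Set.ofList, PySem.Set.empty, PySem.Chars.split₀] using this
  have hA : ((PySem.Str.split₀ p.2).map (fun w => PySem.Set.ofList w.toList))
      = (PySem.Chars.split₀ p.2.toList).map (fun w => PySem.Set.ofList w) := by
    simp [PySem.Str.split₀, Function.comp]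
  rw [hA, hB, rowA_eq]

-- ===== VERDICT (by name: the statement is the Claim_ definition above) =====
theorem part1_spec : Claim_equal_part1 := by
  intro data _
  show part1 data = part1_alt data
  unfold part1 part1_alt
  have hf : (fun (t : Int) (p : String × String) =>
      ((PySem.Str.split₀ p.2).map (fun w => PySem.Set.ofList w.toList)).foldl
        (fun t y =>
          match PySem.Set.len y with
          | 2 => t + 1 | 3 => t + 1 | 4 => t + 1 | 7 => t + 1 | _ => t) t)
      = (fun (t : Int) (p : String × String) => part1AltGo p.2.toList PySem.Set.empty t) :=
    funext fun t => funext fun p => row_eq p t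
  rw [hf]
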